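-- pv_equiv track=rewrite | github.com/caseboybelize501/ml.learn | src/agents/eval_agent.py | _count_consecutive_passes
-- ===== SOURCE A (Python) =====
-- from typing import Dict, List, Any
--
-- def _count_consecutive_passes(results: Dict) -> int:
--     # Count consecutive passing evaluations
--     passes = 0
--     max_passes = 0
--
--     for i in range(1, 11):
--         if f"stage_{i}" in results and results[f"stage_{i}"]["passed"]:
--             passes += 1
--             max_passes = max(max_passes, passes)
--         else:
--             passes = 0
--
--     return max_passes
-- ===== SOURCE B (Python) =====
-- from itertools import groupby
--
-- def _count_consecutive_passes(results):
--     # Build the ten per-stage pass flags (same access expression as theoriginal loop),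
--     # then group consecutive equal flags and take the longest True group.
--     flags = [bool(results[f"stage_{i}"]["passed"]) if f"stage_{i}" in results else False
--              for i in range(1, 11)]
--     return max((sum(1 for _ in g) for k, g in groupby(flags) if k), default=0)
-- ===== Notes on version B (the rewrite author's own statement) =====
-- stated objective: idiomatic
-- what changed: B replaces A's reset-on-fail running counter (passes/max_passes state machine) with a build-then-group-then-max pipeline: it materializes the ten per-stage pass flags and takes the longest True group via itertools.groupby.
import Mathlib
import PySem

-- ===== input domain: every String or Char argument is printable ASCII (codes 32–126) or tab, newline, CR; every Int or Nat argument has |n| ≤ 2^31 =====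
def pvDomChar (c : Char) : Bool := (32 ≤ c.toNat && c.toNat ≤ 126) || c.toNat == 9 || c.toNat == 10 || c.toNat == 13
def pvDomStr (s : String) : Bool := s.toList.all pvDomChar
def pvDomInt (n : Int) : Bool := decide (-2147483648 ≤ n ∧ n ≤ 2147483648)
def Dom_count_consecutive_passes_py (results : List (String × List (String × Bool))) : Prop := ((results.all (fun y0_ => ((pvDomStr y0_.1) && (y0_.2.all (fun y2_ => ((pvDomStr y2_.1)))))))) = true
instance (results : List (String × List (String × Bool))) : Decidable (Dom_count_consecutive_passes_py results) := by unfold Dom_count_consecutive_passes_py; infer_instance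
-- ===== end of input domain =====

-- B replaces A's reset-on-fail running counter with a flags/groupby/max pipeline (idiomatic decomposition, same cost).


-- ===== PORT A =====
-- shared access expression: `results[f"stage_{i}"]["passed"] if f"stage_{i}" in results else False`
-- (inside Pre_ the inner "passed" lookup always succeeds, so getD false is exact there)
def pvStageFlag (results : List (String × List (String × Bool))) (i : Int) : Bool :=
  match (PySem.Dict.mk results).get? ("stage_" ++ PySem.Int.toStr i) with
  | some inner => ((PySem.Dict.mk inner).get? "passed").getD false
  | none => false

-- loop body of A: (passes, max_passes) updated per stage
def pvStepA (s : Int × Int) (b : Bool) : Int × Int :=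
  if b then (s.1 + 1, max s.2 (s.1 + 1)) else (0, s.2)

def count_consecutive_passes_py (results : List (String × List (String × Bool))) : Int :=
  ((PySem.List.pyRange 1 11 1).foldl
    (fun (s : Int × Int) i => pvStepA s (pvStageFlag results i)) (0, 0)).2

-- ===== PORT B =====
-- itertools.groupby over a List Bool, keeping (key, length of the group)
def pvGroups : List Bool → List (Bool × Int)
  | [] => []
  | b :: t =>
    match pvGroups t with
    | (k, n) :: r => if k == b then (k, n + 1) :: r else (b, 1) :: (k, n) :: r
    | [] => [(b, 1)]

-- max(…, default=0) over the lengths of the True groups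
def pvStepMax (m : Int) (g : Bool × Int) : Int := if g.1 then max m g.2 else m

def count_consecutive_passes_py_alt (results : List (String × List (String × Bool))) : Int :=
  (pvGroups ((PySem.List.pyRange 1 11 1).map (pvStageFlag results))).foldl pvStepMax 0

-- ===== PRECONDITION & SPEC =====
-- Pre_ excludes exactly the inputs where Python raises KeyError: a present stage_1..stage_10
-- entry whose inner dict has no "passed" key (both A and B raise there, via the same access).
def Pre_count_consecutive_passes_py (results : List (String × List (String × Bool))) : Prop :=
  ((PySem.List.pyRange 1 11 1).all (fun i =>
    match (PySem.Dict.mk results).get? ("stage_" ++ PySem.Int.toStr i) with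
    | some inner => ((PySem.Dict.mk inner).get? "passed").isSome
    | none => true)) = true
instance (results : List (String × List (String × Bool))) : Decidable (Pre_count_consecutive_passes_py results) := by
  unfold Pre_count_consecutive_passes_py; infer_instance

def pvWitness_count_consecutive_passes_py : (List (String × List (String × Bool))) :=
  [("stage_1", [("passed", true)]), ("stage_2", [("passed", true)]), ("stage_4", [("passed", false)])]

def Spec_count_consecutive_passes_py (results : List (String × List (String × Bool))) (out : Int) : Prop := out = count_consecutive_passes_py_alt results
instance (results : List (String × List (String × Bool))) (out : Int) : Decidable (Spec_count_consecutive_passes_py results out) := by unfold Spec_count_consecutive_passes_py; infer_instance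

-- ===== CLAIM (what is proved, stated in full; the proofs are below) =====
def Claim_equal_count_consecutive_passes_py : Prop := ∀ (results : List (String × List (String × Bool))), Dom_count_consecutive_passes_py results → Pre_count_consecutive_passes_py results → Spec_count_consecutive_passes_py results (count_consecutive_passes_py results)

-- ===== LEMMAS AND PROOFS =====

-- the longest run of `true`s, counting a run of length p already in progress
def pvH : Int → List Bool → Int
  | p, [] => p
  | p, true :: t => pvH (p + 1) t
  | p, false :: t => max p (pvH 0 t)

theorem pvH_ge (l : List Bool) : ∀ p : Int, p ≤ pvH p l := by
  induction l with
  | nil => intro p; simp [pvH]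
  | cons b t ih =>
    intro p
    cases b with
    | true => exact le_trans (by omega) (ih (p + 1))
    | false => simp only [pvH]; exact le_max_left _ _

theorem pvFoldMax_ge (l : List (Bool × Int)) : ∀ m : Int, m ≤ l.foldl pvStepMax m := by
  induction l with
  | nil => intro m; simp
  | cons x t ih =>
    intro m
    refine le_trans ?_ (ih (pvStepMax m x))
    unfold pvStepMax; split
    · exact le_max_left _ _
    · exact le_rfl

theorem pvFoldMax_init (l : List (Bool × Int)) :
    ∀ m : Int, 0 ≤ m → l.foldl pvStepMax m = max m (l.foldl pvStepMax 0) := by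
  induction l with
  | nil => intro m hm; simp [max_eq_left hm]
  | cons x t ih =>
    intro m hm
    have h0 := pvFoldMax_ge t 0
    simp only [List.foldl_cons]
    by_cases hx : x.1
    · rw [show pvStepMax m x = max m x.2 by simp [pvStepMax, hx],
        show pvStepMax 0 x = max 0 x.2 by simp [pvStepMax, hx],
        ih (max m x.2) (le_trans hm (le_max_left _ _)), ih (max 0 x.2) (le_max_left _ _)]
      simp only [max_def]; split_ifs <;> omega
    · rw [show pvStepMax m x = m by simp [pvStepMax, hx],
        show pvStepMax 0 x = 0 by simp [pvStepMax, hx]]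
      exact ih m hm

theorem pvGroups_pos (l : List Bool) : ∀ x ∈ pvGroups l, 1 ≤ x.2 := by
  induction l with
  | nil => simp [pvGroups]
  | cons b t ih =>
    intro x hx
    simp only [pvGroups] at hx
    cases h : pvGroups t with
    | nil => rw [h] at hx; simp at hx; simp [hx]
    | cons kn r =>
      rw [h] at hx
      obtain ⟨k, n⟩ := kn
      have hkn : 1 ≤ n := ih (k, n) (by rw [h]; exact List.mem_cons_self)
      by_cases hk : (k == b) = true <;> simp [hk] at hx <;>
        rcases hx with hx | hx <;>
        first
          | (subst hx; omega)
          | (rcases hx with hx | hx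
             · subst hx; omega
             · exact ih x (by rw [h]; exact List.mem_cons_of_mem _ hx))
          | exact ih x (by rw [h]; exact List.mem_cons_of_mem _ hx)

-- value of B's fold when a run of length p is prepended to the first group (if it is a True group)
def pvLead (p : Int) : List (Bool × Int) → Int
  | (true, n) :: r => max (p + n) (r.foldl pvStepMax 0)
  | l => max p (l.foldl pvStepMax 0)

theorem pvLead_groups (t : List Bool) : ∀ p : Int, 0 ≤ p → pvLead p (pvGroups t) = pvH p t := by
  induction t with
  | nil => intro p hp; simp only [pvGroups, pvLead, pvH, List.foldl_nil]; exact max_eq_left hp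
  | cons b t ih =>
    intro p hp
    cases h : pvGroups t with
    | nil =>
      have h0 : pvH 0 t = 0 := by have := ih 0 le_rfl; rw [h] at this; simpa [pvLead] using this.symm
      have h1 : pvH (p + 1) t = p + 1 := by
        have := ih (p + 1) (by omega); rw [h] at this
        simp only [pvLead, List.foldl_nil] at this
        rw [max_eq_left (by omega)] at this; omega
      cases b with
      | true => simp only [pvGroups, h, pvLead, pvH, List.foldl_nil, h1]; exact max_eq_left (by omega)
      | false => simp [pvGroups, h, pvLead, pvH, pvStepMax, h0]
    | cons kn r =>
      obtain ⟨k, n⟩ := kn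
      have hn : 1 ≤ n := pvGroups_pos t (k, n) (by rw [h]; exact List.mem_cons_self)
      have hr0 : (0 : Int) ≤ r.foldl pvStepMax 0 := pvFoldMax_ge r 0
      cases k with
      | true =>
        have iht : ∀ q : Int, 0 ≤ q → max (q + n) (r.foldl pvStepMax 0) = pvH q t := by
          intro q hq; have := ih q hq; rw [h] at this; simpa [pvLead] using this
        cases b with
        | true =>
          have : pvGroups (true :: t) = (true, n + 1) :: r := by simp [pvGroups, h]
          rw [this]
          simp only [pvLead, pvH]
          rw [← iht (p + 1) (by omega)]; simp only [max_def]; split_ifs <;> omega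
        | false =>
          have : pvGroups (false :: t) = (false, 1) :: (true, n) :: r := by simp [pvGroups, h]
          rw [this]
          simp only [pvLead, pvH, List.foldl_cons]
          rw [show pvStepMax 0 (false, 1) = 0 by simp [pvStepMax],
            show pvStepMax 0 (true, n) = max 0 n by simp [pvStepMax],
            pvFoldMax_init r (max 0 n) (le_max_left _ _), ← iht 0 le_rfl]
          simp only [max_def]; split_ifs <;> omega
      | false =>
        have iht : ∀ q : Int, 0 ≤ q → max q (pvStepMax 0 (false, n) |> (r.foldl pvStepMax ·)) = pvH q t := by
          intro q hq; have := ih q hq; rw [h] at this; simpa [pvLead] using this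
        simp only [pvStepMax, show ((false, n).1 = true) = False by simp, if_false] at iht
        cases b with
        | true =>
          have : pvGroups (true :: t) = (true, 1) :: (false, n) :: r := by simp [pvGroups, h]
          rw [this]
          simp only [pvLead, pvH, List.foldl_cons]
          rw [show pvStepMax 0 (false, n) = 0 by simp [pvStepMax], ← iht (p + 1) (by omega)]
        | false =>
          have : pvGroups (false :: t) = (false, n + 1) :: r := by simp [pvGroups, h]
          rw [this]
          simp only [pvLead, pvH, List.foldl_cons]
          rw [show pvStepMax 0 (false, n + 1) = 0 by simp [pvStepMax], ← iht 0 le_rfl]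
          simp only [max_def]; split_ifs <;> omega

theorem pvFoldMax_eq_lead (l : List (Bool × Int)) (hpos : ∀ x ∈ l, 1 ≤ x.2) :
    l.foldl pvStepMax 0 = pvLead 0 l := by
  cases l with
  | nil => simp [pvLead]
  | cons kn r =>
    obtain ⟨k, n⟩ := kn
    have hn : 1 ≤ n := hpos (k, n) List.mem_cons_self
    have hr0 : (0 : Int) ≤ r.foldl pvStepMax 0 := pvFoldMax_ge r 0
    cases k with
    | true =>
      simp only [pvLead, List.foldl_cons]
      rw [show pvStepMax 0 (true, n) = max 0 n by simp [pvStepMax],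
        pvFoldMax_init r (max 0 n) (le_max_left _ _)]
      simp only [max_def]; split_ifs <;> omega
    | false =>
      simp only [pvLead, List.foldl_cons]
      rw [show pvStepMax 0 (false, n) = 0 by simp [pvStepMax]]
      exact (max_eq_right (pvFoldMax_ge r 0)).symm

theorem pvLoopA (l : List Bool) : ∀ p m : Int, 0 ≤ p → p ≤ m →
    (l.foldl pvStepA (p, m)).2 = max m (pvH p l) := by
  induction l with
  | nil => intro p m hp hpm; simp only [List.foldl_nil, pvH]; exact (max_eq_left hpm).symm
  | cons b t ih =>
    intro p m hp hpm
    cases b with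
    | true =>
      have hge := pvH_ge t (p + 1)
      have hstep : pvStepA (p, m) true = (p + 1, max m (p + 1)) := by simp [pvStepA]
      simp only [List.foldl_cons, hstep, pvH]
      rw [ih (p + 1) (max m (p + 1)) (by omega) (le_max_right _ _)]
      simp only [max_def]; split_ifs <;> omega
    | false =>
      have hstep : pvStepA (p, m) false = (0, m) := by simp [pvStepA]
      simp only [List.foldl_cons, hstep, pvH]
      rw [ih 0 m le_rfl (le_trans hp hpm)]
      have := pvH_ge t 0
      simp only [max_def]; split_ifs <;> omega

-- ===== VERDICT (by name: the statement is the Claim_ definition above) =====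
theorem count_consecutive_passes_py_spec : Claim_equal_count_consecutive_passes_py := by
  intro results _ _
  unfold Spec_count_consecutive_passes_py count_consecutive_passes_py count_consecutive_passes_py_alt
  rw [pvFoldMax_eq_lead _ (pvGroups_pos _), pvLead_groups _ 0 le_rfl]
  have hmap : (PySem.List.pyRange 1 11 1).foldl
      (fun (s : Int × Int) i => pvStepA s (pvStageFlag results i)) (0, 0)
      = ((PySem.List.pyRange 1 11 1).map (pvStageFlag results)).foldl pvStepA (0, 0) :=
    by rw [List.foldl_map]
  rw [hmap, pvLoopA ((PySem.List.pyRange 1 11 1).map (pvStageFlag results)) 0 0 le_rfl le_rfl]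
  exact max_eq_right (pvH_ge ((PySem.List.pyRange 1 11 1).map (pvStageFlag results)) 0)
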